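-- pv_equiv track=rewrite | github.com/RodrigoEnd/sistema-digital-comunidad | src/utilidades.py | detectar_folios_duplicados
-- ===== SOURCE A (Python) =====
-- def detectar_folios_duplicados(personas):
--     """
--     Detecta folios duplicados en una lista de personas
--
--     Args:
--         personas (list): Lista de personas
--
--     Returns:
--         dict: Diccionario con folios duplicados y las personas que los usan
--     """
--     folios_dict = {}
--     duplicados = {}
--
--     for persona in personas:
--         folio = persona.get('folio', 'SIN-FOLIO')
--         nombre = persona.get('nombre', 'Sin nombre')
--
--         if folio in folios_dict:
--             # Es un duplicado
--             if folio not in duplicados: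
--                 duplicados[folio] = [folios_dict[folio]]
--             duplicados[folio].append(nombre)
--         else:
--             folios_dict[folio] = nombre
--
--     return duplicados
-- ===== SOURCE B (Python) =====
-- def detectar_folios_duplicados(personas):
--     """
--     Detecta folios duplicados en una lista de personas
--
--     Args:
--         personas (list): Lista de personas
--
--     Returns:
--         dict: Diccionario con folios duplicados y las personas que los usan
--     """
--     resultado = {}
--     vistos = set()
--     for persona in personas:
--         folio = persona.get('folio', 'SIN-FOLIO')
--         if folio in vistos and folio not in resultado:
--             # second time we meet this folio: collect every name using it
--             resultado[folio] = [p.get('nombre', 'Sin nombre') for p in personas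
--                                 if p.get('folio', 'SIN-FOLIO') == folio]
--         vistos.add(folio)
--     return resultado
-- ===== Notes on version B (the rewrite author's own statement) =====
-- stated objective: alternative
-- what changed: B drops A's incremental per-folio accumulation (two dicts grown together) and instead, at the second occurrence of a folio, emits the full name list for that folio with a single comprehension over the input; no value lists are maintained across iterations.
import Mathlib
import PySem

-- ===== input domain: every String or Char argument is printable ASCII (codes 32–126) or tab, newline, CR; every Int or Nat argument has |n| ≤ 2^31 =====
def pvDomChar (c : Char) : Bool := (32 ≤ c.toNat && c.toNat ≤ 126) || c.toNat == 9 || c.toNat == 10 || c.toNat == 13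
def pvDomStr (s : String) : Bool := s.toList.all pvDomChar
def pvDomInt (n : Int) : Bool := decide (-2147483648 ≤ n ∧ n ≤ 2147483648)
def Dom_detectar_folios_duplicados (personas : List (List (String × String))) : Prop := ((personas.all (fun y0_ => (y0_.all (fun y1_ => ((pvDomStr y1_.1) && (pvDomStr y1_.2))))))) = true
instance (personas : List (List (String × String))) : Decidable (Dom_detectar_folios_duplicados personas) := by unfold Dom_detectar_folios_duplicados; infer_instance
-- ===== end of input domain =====

-- B replaces A's incremental accumulation of per-folio name lists (two dicts grown together)
-- by emitting, at a folio's second occurrence, the complete name list computed by one comprehension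
-- over the input (objective: alternative decomposition, same return value).


-- persona.get(k, d): first-match lookup in the association list (Python dicts have unique keys)
def pvGetStr (p : List (String × String)) (k d : String) : String :=
  (PySem.Dict.mk p).getD k d

-- ===== PORT A =====
-- one iteration of A's loop over (folios_dict, duplicados)
def pvStepA (st : PySem.Dict String String × PySem.Dict String (List String))
    (persona : List (String × String)) :
    PySem.Dict String String × PySem.Dict String (List String) :=
  let folio := pvGetStr persona "folio" "SIN-FOLIO"
  let nombre := pvGetStr persona "nombre" "Sin nombre"
  if st.1.contains folio then
    -- duplicados[folio] = [folios_dict[folio]] ;  folios_dict[folio] is present, so getD's default is never read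
    let dup1 := if st.2.contains folio then st.2 else st.2.insert folio [st.1.getD folio ""]
    -- duplicados[folio].append(nombre)
    (st.1, dup1.modify folio [] (fun l => l ++ [nombre]))
  else
    (st.1.insert folio nombre, st.2)

def detectar_folios_duplicados (personas : List (List (String × String))) : List (String × List String) :=
  (personas.foldl pvStepA (PySem.Dict.empty, PySem.Dict.empty)).2.items

-- ===== PORT B =====
-- [p.get('nombre','Sin nombre') for p in personas if p.get('folio','SIN-FOLIO') == folio]
def pvNombresDe (personas : List (List (String × String))) (folio : String) : List String :=
  (personas.filter (fun q => pvGetStr q "folio" "SIN-FOLIO" == folio)).map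
    (fun q => pvGetStr q "nombre" "Sin nombre")

-- one iteration of B's loop over (resultado, vistos)
def pvStepB (personas : List (List (String × String)))
    (st : PySem.Dict String (List String) × PySem.Set String)
    (persona : List (String × String)) :
    PySem.Dict String (List String) × PySem.Set String :=
  let folio := pvGetStr persona "folio" "SIN-FOLIO"
  let res := if st.2.contains folio && !(st.1.contains folio)
             then st.1.insert folio (pvNombresDe personas folio) else st.1
  (res, PySem.Set.add st.2 folio)

def detectar_folios_duplicados_alt (personas : List (List (String × String))) : List (String × List String) :=
  (personas.foldl (pvStepB personas) (PySem.Dict.empty, PySem.Set.empty)).1.items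

-- ===== PRECONDITION & SPEC =====
def Spec_detectar_folios_duplicados (personas : List (List (String × String))) (out : List (String × List String)) : Prop := out = detectar_folios_duplicados_alt personas
instance (personas : List (List (String × String))) (out : List (String × List String)) : Decidable (Spec_detectar_folios_duplicados personas out) := by unfold Spec_detectar_folios_duplicados; infer_instance

-- ===== CLAIM (what is proved, stated in full; the proofs are below) =====
def Claim_equal_detectar_folios_duplicados : Prop := ∀ (personas : List (List (String × String))), Dom_detectar_folios_duplicados personas → Spec_detectar_folios_duplicados personas (detectar_folios_duplicados personas)

-- ===== LEMMAS AND PROOFS =====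

lemma pvNombresDe_cons (p : List (String × String)) (rest : List (List (String × String))) (f : String) :
    pvNombresDe (p :: rest) f =
      (if pvGetStr p "folio" "SIN-FOLIO" = f then [pvGetStr p "nombre" "Sin nombre"] else []) ++
        pvNombresDe rest f := by
  simp [pvNombresDe, List.filter_cons]
  split_ifs with h <;> simp_all

lemma pv_contains_items {ν : Type} (d : PySem.Dict String ν) (f : String) :
    d.contains f = d.items.any (fun q => q.1 == f) := rfl

lemma pv_not_contains_key {ν : Type} (d : PySem.Dict String ν) (f : String)
    (h : d.contains f = false) : ∀ q ∈ d.items, q.1 ≠ f := by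
  intro q hq
  rw [pv_contains_items] at h
  simp [List.any_eq_false] at h
  exact h q.1 q.2 hq

-- res mirrors dup's keys, hence the same contains
lemma pv_contains_map {ν : Type} (dup res : PySem.Dict String ν) (g : String × ν → ν)
    (h : res.items = dup.items.map (fun q => (q.1, g q))) (f : String) :
    res.contains f = dup.contains f := by
  rw [pv_contains_items, pv_contains_items, h, List.any_map]
  rfl

lemma pv_contains_of_mem {ν : Type} (d : PySem.Dict String ν) {q : String × ν}
    (hq : q ∈ d.items) : d.contains q.1 = true := by
  rw [pv_contains_items]
  exact List.any_eq_true.2 ⟨q, hq, by simp⟩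

lemma pvLoops_eq (personas : List (List (String × String))) :
    ∀ (rest : List (List (String × String))) (fd : PySem.Dict String String)
      (dup res : PySem.Dict String (List String)) (vistos : PySem.Set String),
    (∀ f, fd.contains f = vistos.contains f) →
    dup.keys.Nodup →
    (∀ f, dup.contains f = true → fd.contains f = true) →
    (res.items = dup.items.map (fun q => (q.1, q.2 ++ pvNombresDe rest q.1))) →
    (∀ f, fd.contains f = true → dup.contains f = false →
        fd.getD f "" :: pvNombresDe rest f = pvNombresDe personas f) →
    (∀ f, fd.contains f = false → pvNombresDe rest f = pvNombresDe personas f) →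
    (rest.foldl pvStepA (fd, dup)).2.items = (rest.foldl (pvStepB personas) (res, vistos)).1.items := by
  intro rest
  induction rest with
  | nil =>
      intro fd dup res vistos h1 h2 h3 h4 h5 h6
      simp [pvNombresDe] at h4
      simp [h4]
  | cons p rest ih =>
      intro fd dup res vistos h1 h2 h3 h4 h5 h6
      set f := pvGetStr p "folio" "SIN-FOLIO" with hf
      set n := pvGetStr p "nombre" "Sin nombre" with hn
      have hres : ∀ g, res.contains g = dup.contains g := fun g =>
        pv_contains_map dup res _ h4 g
      have hNcons : ∀ g, pvNombresDe (p :: rest) g =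
          (if f = g then [n] else []) ++ pvNombresDe rest g := fun g => pvNombresDe_cons p rest g
      simp only [List.foldl_cons]
      cases hc : fd.contains f with
      | true =>
        have hv : vistos.contains f = true := by rw [← h1 f]; exact hc
        have hvadd : PySem.Set.add vistos f = vistos := by
          show (if vistos.contains f = true then vistos else vistos ++ [f]) = vistos
          rw [hv]; simp
        cases hd : dup.contains f with
        | true =>
          have hstepA : pvStepA (fd, dup) p = (fd, dup.insert f (dup.getD f [] ++ [n])) := by
            simp [pvStepA, ← hf, ← hn, hc, hd, PySem.Dict.modify]
          have hstepB : pvStepB personas (res, vistos) p = (res, vistos) := by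
            simp [pvStepB, ← hf, hres f, hd, hvadd]
          rw [hstepA, hstepB]
          apply ih
          · exact h1
          · rw [PySem.Dict.keys_insert_of_contains dup _ hd]; exact h2
          · intro g hg
            rw [PySem.Dict.contains_insert] at hg
            simp only [Bool.or_eq_true, beq_iff_eq] at hg
            rcases hg with h | h
            · subst h; exact hc
            · exact h3 g h
          · rw [PySem.Dict.items_insert_of_contains dup _ hd, h4, List.map_map]
            apply List.map_congr_left
            intro q hq
            by_cases hqf : q.1 = f
            · have hq2 : dup.getD f [] = q.2 := by
                have := PySem.Dict.getD_of_mem_items dup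
                  (k := q.1) (v := q.2) (by simpa using hq) h2 []
                rw [hqf] at this; exact this
              simp [Function.comp, hqf, hNcons, ← hq2, List.append_assoc]
            · simp [Function.comp, hqf, hNcons, if_neg (Ne.symm hqf)]
          · intro g hgfd hgdup
            rw [PySem.Dict.contains_insert] at hgdup
            simp only [Bool.or_eq_false_iff, beq_eq_false_iff_ne] at hgdup
            have := h5 g hgfd hgdup.2
            rwa [hNcons g, if_neg (Ne.symm hgdup.1), List.nil_append] at this
          · intro g hg
            have hgne : f ≠ g := by intro e; rw [e, hg] at hc; cases hc
            have := h6 g hg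
            rwa [hNcons g, if_neg hgne, List.nil_append] at this
        | false =>
          have hresf : res.contains f = false := by rw [hres f]; exact hd
          have hstepA : pvStepA (fd, dup) p = (fd, dup.insert f ([fd.getD f ""] ++ [n])) := by
            simp [pvStepA, ← hf, ← hn, hc, hd, PySem.Dict.modify,
              PySem.Dict.insert_insert_self, PySem.Dict.getD_insert_self]
          have hvm : f ∈ vistos := by simpa using hv
          have hstepB : pvStepB personas (res, vistos) p =
              (res.insert f (pvNombresDe personas f), vistos) := by
            simp [pvStepB, ← hf, hresf, hvm]
          rw [hstepA, hstepB]
          apply ih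
          · exact h1
          · rw [PySem.Dict.keys_insert_of_not_contains dup _ hd]
            have hfk : f ∉ dup.keys := fun hm =>
              by rw [(PySem.Dict.contains_iff_mem_keys dup f).2 hm] at hd; cases hd
            simp [List.nodup_append, h2]
            intro a ha e
            exact hfk (e ▸ ha)
          · intro g hg
            rw [PySem.Dict.contains_insert] at hg
            simp only [Bool.or_eq_true, beq_iff_eq] at hg
            rcases hg with h | h
            · subst h; exact hc
            · exact h3 g h
          · rw [PySem.Dict.items_insert_of_not_contains dup _ hd,
              PySem.Dict.items_insert_of_not_contains res _ hresf, h4, List.map_append]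
            congr 1
            · apply List.map_congr_left
              intro q hq
              have hqf : q.1 ≠ f := pv_not_contains_key dup f hd q hq
              simp [hNcons, if_neg (Ne.symm hqf)]
            · have h5f := h5 f hc hd
              rw [hNcons f, if_pos rfl] at h5f
              simp [← h5f]
          · intro g hgfd hgdup
            rw [PySem.Dict.contains_insert] at hgdup
            simp only [Bool.or_eq_false_iff, beq_eq_false_iff_ne] at hgdup
            have := h5 g hgfd hgdup.2
            rwa [hNcons g, if_neg (Ne.symm hgdup.1), List.nil_append] at this
          · intro g hg
            have hgne : f ≠ g := by intro e; rw [e, hg] at hc; cases hc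
            have := h6 g hg
            rwa [hNcons g, if_neg hgne, List.nil_append] at this
      | false =>
        have hv : vistos.contains f = false := by rw [← h1 f]; exact hc
        have hstepA : pvStepA (fd, dup) p = (fd.insert f n, dup) := by
          simp [pvStepA, ← hf, ← hn, hc]
        have hstepB : pvStepB personas (res, vistos) p = (res, vistos ++ [f]) := by
          have hvm : f ∉ vistos := by simpa using hv
          simp [pvStepB, ← hf, hvm, PySem.Set.add]
        rw [hstepA, hstepB]
        apply ih
        · intro g
          rw [PySem.Dict.contains_insert]
          simp [h1 g, Bool.or_comm, beq_eq_decide]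
        · exact h2
        · intro g hg
          rw [PySem.Dict.contains_insert]
          simp [h3 g hg]
        · rw [h4]
          apply List.map_congr_left
          intro q hq
          have hqd : dup.contains q.1 = true := pv_contains_of_mem dup hq
          have hqf : q.1 ≠ f := fun e => by rw [← e, h3 q.1 hqd] at hc; cases hc
          simp [hNcons, if_neg (Ne.symm hqf)]
        · intro g hgfd hgdup
          by_cases hgf : g = f
          · rw [hgf, PySem.Dict.getD_insert_self]
            have := h6 f hc
            rw [hNcons f, if_pos rfl] at this
            simpa using this
          · rw [PySem.Dict.contains_insert] at hgfd
            simp only [Bool.or_eq_true, beq_iff_eq] at hgfd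
            rcases hgfd with h | h
            · exact absurd h hgf
            · have := h5 g h hgdup
              rw [PySem.Dict.getD_insert_of_ne _ _ _ hgf]
              rwa [hNcons g, if_neg (Ne.symm hgf), List.nil_append] at this
        · intro g hg
          rw [PySem.Dict.contains_insert] at hg
          simp only [Bool.or_eq_false_iff, beq_eq_false_iff_ne] at hg
          have := h6 g hg.2
          rwa [hNcons g, if_neg (Ne.symm hg.1), List.nil_append] at this

-- ===== VERDICT (by name: the statement is the Claim_ definition above) =====
theorem detectar_folios_duplicados_spec : Claim_equal_detectar_folios_duplicados := by
  intro personas _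
  unfold Spec_detectar_folios_duplicados detectar_folios_duplicados detectar_folios_duplicados_alt
  exact pvLoops_eq personas personas PySem.Dict.empty PySem.Dict.empty PySem.Dict.empty PySem.Set.empty
    (by intro f; rfl) (by simp [PySem.Dict.empty, PySem.Dict.keys]) (by intro f h; simp at h)
    (by rfl) (by intro f h; simp [PySem.Dict.contains_empty] at h) (by intro f _; rfl)
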